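-- pv_equiv track=rewrite | github.com/rastislavsvoboda/advent-of-code-2022 | aoc_2022_d25b.py | generate_SNAFU
-- ===== SOURCE A (Python) =====
-- def generate_SNAFU(num):
--     D = {0: ('0', 0), 1: ('1', 0), 2: ('2', 0), 3: ('=', 1), 4: ('-', 1)}
--     s = ""
--     while True:
--         div = num // 5
--         mod = num % 5
--         char, add = D[mod]
--         s += char
--         div += add
--         if div == 0:
--             break
--         num = div
--     return s[::-1]
-- ===== SOURCE B (Python) =====
-- def generate_SNAFU(num):
--     def helper(n):
--         if n == 0:
--             return ""
--         return helper((n + 2) // 5) + "=-012"[(n + 2) % 5]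
--     return helper(num) or "0"
-- ===== Notes on version B (the rewrite author's own statement) =====
-- stated objective: simpler
-- what changed: Replaces the digit dict, explicit carry variable, accumulate-then-reverse loop by a most-significant-first recursion on (num+2)//5 indexing the digit string '=-012' by (num+2)%5, so no dict, no carry and no final reversal.
import Mathlib
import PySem

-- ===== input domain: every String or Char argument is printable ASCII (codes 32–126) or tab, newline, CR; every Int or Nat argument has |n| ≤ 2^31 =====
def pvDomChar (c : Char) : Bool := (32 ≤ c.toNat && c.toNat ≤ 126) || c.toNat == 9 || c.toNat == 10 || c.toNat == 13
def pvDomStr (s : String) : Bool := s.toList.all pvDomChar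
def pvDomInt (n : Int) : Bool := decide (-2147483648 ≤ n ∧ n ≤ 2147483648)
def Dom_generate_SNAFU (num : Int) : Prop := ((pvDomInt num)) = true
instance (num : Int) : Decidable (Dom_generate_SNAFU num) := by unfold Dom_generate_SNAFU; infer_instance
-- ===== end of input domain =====

-- B replaces A's digit dict, carry variable and accumulate-then-reverse loop by a
-- most-significant-first recursion on (num+2)//5 that indexes "=-012" by (num+2)%5 (objective: simpler).
-- Both loops are written with an explicit fuel argument (|num|+1 steps always suffice, proved below);
-- the fuel is only a totality guard, the zero-fuel branches are never reached.

-- ===== PORT A =====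
-- the dict D of A
def snafuD : PySem.Dict Int (String × Int) :=
  PySem.Dict.ofList [(0, ("0", 0)), (1, ("1", 0)), (2, ("2", 0)), (3, ("=", 1)), (4, ("-", 1))]

-- A's while-loop; s is the accumulated digit string.  The `.getD ("", 0)` default is
-- unreachable: 0 ≤ num % 5 < 5 is always a key of D, Python never raises KeyError.
def snafuLoop : Nat → Int → String → String
  | 0, _, s => s                        -- fuel exhausted: unreachable for fuel > |num|
  | fuel + 1, num, s =>
    let dv := PySem.Int.floordiv num 5
    let md := PySem.Int.mod num 5
    let p := (snafuD.get? md).getD ("", 0)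
    let s' := s ++ p.1
    let dv' := dv + p.2
    if dv' = 0 then s' else snafuLoop fuel dv' s'

def generate_SNAFU (num : Int) : String :=
  (PySem.Str.slice? (snafuLoop (num.natAbs + 1) num "") none none (-1)).getD ""   -- s[::-1]; some for step -1

-- ===== PORT B =====
-- B's helper; the `.getD ' '` default is unreachable: 0 ≤ (n+2) % 5 < 5 = len("=-012")
def snafuHelper : Nat → Int → String
  | 0, _ => ""                          -- fuel exhausted: unreachable for fuel > |n|
  | fuel + 1, n =>
    if n = 0 then ""
    else snafuHelper fuel (PySem.Int.floordiv (n + 2) 5) ++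
      String.ofList [(PySem.Str.pyGet? "=-012" (PySem.Int.mod (n + 2) 5)).getD ' ']

def generate_SNAFU_alt (num : Int) : String :=
  let r := snafuHelper (num.natAbs + 1) num
  if r = "" then "0" else r   -- `helper(num) or "0"`

-- ===== PRECONDITION & SPEC =====
def Spec_generate_SNAFU (num : Int) (out : String) : Prop := out = generate_SNAFU_alt num
instance (num : Int) (out : String) : Decidable (Spec_generate_SNAFU num out) := by unfold Spec_generate_SNAFU; infer_instance

-- ===== CLAIM (what is proved, stated in full; the proofs are below) =====
def Claim_equal_generate_SNAFU : Prop := ∀ (num : Int), Dom_generate_SNAFU num → Spec_generate_SNAFU num (generate_SNAFU num)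

-- ===== LEMMAS AND PROOFS =====

-- A's digit for num equals B's digit for num (as a one-character string)
theorem digit_eq (num : Int) :
    ((snafuD.get? (PySem.Int.mod num 5)).getD ("", 0)).1
      = String.ofList [(PySem.Str.pyGet? "=-012" (PySem.Int.mod (num + 2) 5)).getD ' '] := by
  have h0 : (0 : Int) < 5 := by norm_num
  have hb1 := PySem.Int.mod_nonneg num h0
  have hb2 := PySem.Int.mod_lt num h0
  have hm : PySem.Int.mod num 5 = 0 ∨ PySem.Int.mod num 5 = 1 ∨ PySem.Int.mod num 5 = 2 ∨
      PySem.Int.mod num 5 = 3 ∨ PySem.Int.mod num 5 = 4 := by omega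
  have hme := PySem.Int.mod_eq_emod_of_pos (a := num) h0
  have hme2 := PySem.Int.mod_eq_emod_of_pos (a := num + 2) h0
  rcases hm with hm | hm | hm | hm | hm <;> rw [hm] <;> rw [hme] at hm <;>
    rw [hme2, show (num + 2) % 5 = ((num % 5 + 2) % 5) by omega, hm] <;> rfl

-- A's carry-adjusted next value equals B's (num+2)//5
theorem next_eq (num : Int) :
    PySem.Int.floordiv num 5 + ((snafuD.get? (PySem.Int.mod num 5)).getD ("", 0)).2
      = PySem.Int.floordiv (num + 2) 5 := by
  have h0 : (0 : Int) < 5 := by norm_num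
  have hb1 := PySem.Int.mod_nonneg num h0
  have hb2 := PySem.Int.mod_lt num h0
  have hm : PySem.Int.mod num 5 = 0 ∨ PySem.Int.mod num 5 = 1 ∨ PySem.Int.mod num 5 = 2 ∨
      PySem.Int.mod num 5 = 3 ∨ PySem.Int.mod num 5 = 4 := by omega
  have he := PySem.Int.floordiv_eq_ediv_of_pos (a := num) h0
  have he2 := PySem.Int.floordiv_eq_ediv_of_pos (a := num + 2) h0
  have hme := PySem.Int.mod_eq_emod_of_pos (a := num) h0
  rcases hm with hm | hm | hm | hm | hm <;> rw [hm] <;> rw [hme] at hm <;> rw [he, he2] <;>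
    simp only [show ((snafuD.get? 0).getD ("", 0)).2 = 0 from rfl,
      show ((snafuD.get? 1).getD ("", 0)).2 = 0 from rfl,
      show ((snafuD.get? 2).getD ("", 0)).2 = 0 from rfl,
      show ((snafuD.get? 3).getD ("", 0)).2 = 1 from rfl,
      show ((snafuD.get? 4).getD ("", 0)).2 = 1 from rfl] <;> omega

-- the recursion argument shrinks in absolute value
theorem next_shrink (num : Int) (h : PySem.Int.floordiv (num + 2) 5 ≠ 0) :
    (PySem.Int.floordiv (num + 2) 5).natAbs < num.natAbs := by
  rw [PySem.Int.floordiv_eq_ediv_of_pos (a := num + 2) (b := 5) (by norm_num)] at h ⊢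
  omega

theorem next_ne_zero (num : Int) (h : PySem.Int.floordiv (num + 2) 5 ≠ 0) : num ≠ 0 := by
  intro h0; subst h0; exact h rfl

theorem helper_zero (f : Nat) : snafuHelper f 0 = "" := by
  cases f <;> simp [snafuHelper]

-- the helper's value does not depend on the fuel, as long as the fuel suffices
theorem helper_congr : ∀ (f g : Nat) (n : Int), n.natAbs < f → n.natAbs < g →
    snafuHelper f n = snafuHelper g n := by
  intro f
  induction f with
  | zero => intro g n hf; omega
  | succ f ih =>
    intro g n hf hg
    obtain ⟨g', rfl⟩ : ∃ g', g = g' + 1 := ⟨g - 1, by omega⟩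
    rw [snafuHelper, snafuHelper]
    by_cases h0 : n = 0
    · rw [if_pos h0, if_pos h0]
    · rw [if_neg h0, if_neg h0]
      by_cases hq : PySem.Int.floordiv (n + 2) 5 = 0
      · obtain ⟨f', rfl⟩ : ∃ f', f = f' + 1 := ⟨f - 1, by omega⟩
        rw [ih (g' ) _ (by rw [hq]; omega) (by rw [hq]; omega)]
      · have := next_shrink n hq
        rw [ih g' _ (by omega) (by omega)]

-- core invariant: the reversed loop output is B's helper output (or "0" for num = 0) before reversed s
theorem loop_reverse : ∀ (f : Nat) (num : Int), num.natAbs < f → ∀ (s : String),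
    (snafuLoop f num s).toList.reverse
      = (if num = 0 then ['0'] else (snafuHelper (num.natAbs + 1) num).toList) ++ s.toList.reverse := by
  intro f
  induction f with
  | zero => intro num h; omega
  | succ f ih =>
    intro num hlt s
    rw [snafuLoop]
    simp only [next_eq num, digit_eq num]
    by_cases hq : PySem.Int.floordiv (num + 2) 5 = 0
    · rw [if_pos hq]
      by_cases h0 : num = 0
      · subst h0; simp [helper_zero]
      · rw [if_neg h0]
        conv_rhs => rw [snafuHelper, if_neg h0, hq, helper_zero]
        simp
    · rw [if_neg hq]
      have hshrink := next_shrink num hq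
      have hnz := next_ne_zero num hq
      rw [ih _ (by omega) _]
      rw [if_neg hq, if_neg hnz]
      conv_rhs => rw [snafuHelper, if_neg hnz]
      rw [helper_congr ((PySem.Int.floordiv (num + 2) 5).natAbs + 1) num.natAbs _
        (by omega) (by omega)]
      simp

theorem helper_ne_empty (num : Int) (h : num ≠ 0) : snafuHelper (num.natAbs + 1) num ≠ "" := by
  rw [snafuHelper, if_neg h]
  intro hc
  have : (snafuHelper num.natAbs (PySem.Int.floordiv (num + 2) 5) ++
      String.ofList [(PySem.Str.pyGet? "=-012" (PySem.Int.mod (num + 2) 5)).getD ' ']).toList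
      = ("" : String).toList := by rw [hc]
  simp at this

-- ===== VERDICT (by name: the statement is the Claim_ definition above) =====
theorem generate_SNAFU_spec : Claim_equal_generate_SNAFU := by
  intro num _
  unfold Spec_generate_SNAFU generate_SNAFU generate_SNAFU_alt
  rw [PySem.Str.slice?_none_none_neg_one]
  simp only [Option.getD_some]
  rw [loop_reverse (num.natAbs + 1) num (by omega) ""]
  by_cases h0 : num = 0
  · subst h0
    simp [helper_zero]
  · rw [if_neg h0, if_neg (helper_ne_empty num h0)]
    simp
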